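-- pv_equiv track=rewrite | github.com/OceanNuclear/ContinuedFraction | exploration.py | format_series
-- ===== SOURCE A (Python) =====
-- def format_series(l):
--     """In: a list of integers (representing the coefficients in the continued fraction)
--     Out: a string output that, when printed, looks like the algebraic continued fraction expression."""
--     if len(l)==1:
--         coef = str(l[0])
--         return "\n".join([coef])
--     elif len(l)>1:
--         right_denom = format_series(l[1:])
--         right_denom = right_denom.split("\n")
--         coef = str(l[0])
--
--         frac_width = len(right_denom[0])
--         new_width = len(coef)+3+frac_width # calculate the width of the resultant
--
--         fraction = [str(1).center(frac_width), "-"*frac_width] + right_denom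
--
--         added_coef_line = coef + " + " + fraction[1]
--         return "\n".join([fraction[0].rjust(new_width), added_coef_line, *[line.rjust(new_width) for line in fraction[2:]]])
-- ===== SOURCE B (Python) =====
-- def format_series(l):
--     """In: a list of integers (representing the coefficients in the continued fraction)
--     Out: a string output that, when printed, looks like the algebraic continued fraction expression."""
--     reps = [str(x) for x in l]
--     if len(reps) == 1:
--         return reps[0]
--     # widths of each nested sub-expression, computed back to front in one pass
--     widths = [len(reps[-1])]
--     for r in reversed(reps[:-1]):
--         widths.append(len(r) + 3 + widths[-1])
--     widths.reverse()
--     # emit each output line exactly once, tracking the cumulative indentation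
--     lines = []
--     ind = 0
--     for r, w in zip(reps[:-1], widths[1:]):
--         lines.append(" " * (ind + len(r) + 3) + "1".center(w))
--         lines.append(" " * ind + r + " + " + "-" * w)
--         ind += len(r) + 3
--     lines.append(" " * ind + reps[-1])
--     return "\n".join(lines)
-- ===== Notes on version B (the rewrite author's own statement) =====
-- stated objective: faster
-- what changed: Instead of recursively re-splitting and re-padding the entire sub-picture at every level, B computes all nested sub-expression widths in one backward pass and emits each output line exactly once with a cumulative indentation offset.
-- outside the precondition, e.g. on format_series([]): A returns None, B raises IndexError
import Mathlib
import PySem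

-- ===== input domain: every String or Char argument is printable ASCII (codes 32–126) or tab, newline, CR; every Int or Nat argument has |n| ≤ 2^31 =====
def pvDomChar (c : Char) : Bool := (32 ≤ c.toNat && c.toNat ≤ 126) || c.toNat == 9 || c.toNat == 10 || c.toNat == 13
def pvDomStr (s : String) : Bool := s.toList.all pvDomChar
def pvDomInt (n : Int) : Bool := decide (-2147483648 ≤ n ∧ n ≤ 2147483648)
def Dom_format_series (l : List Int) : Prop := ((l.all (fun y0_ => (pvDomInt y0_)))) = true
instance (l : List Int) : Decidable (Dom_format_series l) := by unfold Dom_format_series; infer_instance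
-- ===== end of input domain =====

-- B replaces A's recursive re-split/re-pad of the whole sub-picture at every level by one
-- backward width pass and one forward pass emitting each line once (objective: faster).
-- Strings are ported as code-point lists (List Char), exact on the ASCII domain.

-- CPython str.rjust on char lists (Nat subtraction clamps, exactly like CPython's no-op when w ≤ len)
def charRjust (cs : List Char) (w : Nat) : List Char :=
  List.replicate (w - cs.length) ' ' ++ cs

-- CPython str.center on char lists: left margin = marg // 2 + (marg & width & 1)
def charCenter (cs : List Char) (w : Nat) : List Char :=
  if w ≤ cs.length then cs
  else
    let marg := w - cs.length
    let left := marg / 2 + (if marg % 2 = 1 ∧ w % 2 = 1 then 1 else 0)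
    List.replicate left ' ' ++ cs ++ List.replicate (marg - left) ' '

-- ===== PORT A =====
-- literal transliteration of A on char lists; 'fraction[1]' is the dashes list, named 'dashes' here
def formatSeriesA (l : List Int) : List Char :=
  if l.length = 1 then
    PySem.Chars.join ['\n'] [PySem.Int.toChars l.headI]
  else if 1 < l.length then
    let right_denom := formatSeriesA (PySem.List.slice l (some 1) none)
    let rd := PySem.Chars.splitOn right_denom ['\n']
    let coef := PySem.Int.toChars l.headI
    let frac_width := rd.headI.length
    let new_width := coef.length + 3 + frac_width
    let dashes := List.replicate frac_width '-'
    let fraction := [charCenter ['1'] frac_width, dashes] ++ rd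
    let added_coef_line := coef ++ [' ', '+', ' '] ++ dashes
    PySem.Chars.join ['\n']
      (charRjust fraction.headI new_width :: added_coef_line ::
        (fraction.drop 2).map (fun line => charRjust line new_width))
  else []  -- Python A returns None (not a str) here; excluded by Pre_format_series
termination_by l.length
decreasing_by
  simp [PySem.List.slice_from (a := 1) l (by norm_num)]
  omega

def format_series (l : List Int) : String := String.ofList (formatSeriesA l)

-- ===== PORT B =====
def format_series_alt (l : List Int) : String :=
  let reps := l.map PySem.Int.toChars
  if reps.length = 1 then String.ofList reps.headI
  else
    -- widths of each nested sub-expression, back to front, then reversed (Source B's widths)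
    let widths0 := (reps.dropLast.reverse).foldl
        (fun ws r => ws ++ [r.length + 3 + ws.getLast!]) [reps.getLast!.length]
    let widths := widths0.reverse
    -- emit each line once, tracking cumulative indentation (Source B's lines/ind loop)
    let st := (reps.dropLast.zip (widths.drop 1)).foldl
        (fun (st : List (List Char) × Nat) rw =>
          (st.1 ++
            [List.replicate (st.2 + rw.1.length + 3) ' ' ++ charCenter ['1'] rw.2,
             List.replicate st.2 ' ' ++ rw.1 ++ [' ', '+', ' '] ++ List.replicate rw.2 '-'],
           st.2 + rw.1.length + 3))
        ([], 0)
    String.ofList (PySem.Chars.join ['\n'] (st.1 ++ [List.replicate st.2 ' ' ++ reps.getLast!]))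

-- ===== PRECONDITION & SPEC =====
-- Pre_ excludes only the empty list, on which Python A returns None instead of a string.
def Pre_format_series (l : List Int) : Prop := l ≠ []
instance (l : List Int) : Decidable (Pre_format_series l) := by unfold Pre_format_series; infer_instance
def pvWitness_format_series : List Int := ([3, 7, 15, 1])
def Spec_format_series (l : List Int) (out : String) : Prop := out = format_series_alt l
instance (l : List Int) (out : String) : Decidable (Spec_format_series l out) := by unfold Spec_format_series; infer_instance

-- ===== CLAIM (what is proved, stated in full; the proofs are below) =====
def Claim_equal_format_series : Prop := ∀ (l : List Int), Dom_format_series l → Pre_format_series l → Spec_format_series l (format_series l)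

-- ===== LEMMAS AND PROOFS =====

-- width of the rendered picture of l (every line of it has this length)
def W : List Int → Nat
  | [] => 0
  | [a] => (PySem.Int.toChars a).length
  | a :: b :: rest => (PySem.Int.toChars a).length + 3 + W (b :: rest)

-- the canonical list of output lines
def linesF : List Int → List (List Char)
  | [] => []
  | [a] => [PySem.Int.toChars a]
  | a :: b :: rest =>
      let coef := PySem.Int.toChars a
      let w := W (b :: rest)
      (List.replicate (coef.length + 3) ' ' ++ charCenter ['1'] w)
        :: (coef ++ [' ', '+', ' '] ++ List.replicate w '-')
        :: (linesF (b :: rest)).map (fun line => List.replicate (coef.length + 3) ' ' ++ line)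

-- output lines with an absolute indentation offset (B's view)
def linesAbs : Nat → List Int → List (List Char)
  | _, [] => []
  | ind, [a] => [List.replicate ind ' ' ++ PySem.Int.toChars a]
  | ind, a :: b :: rest =>
      let coef := PySem.Int.toChars a
      let w := W (b :: rest)
      (List.replicate (ind + coef.length + 3) ' ' ++ charCenter ['1'] w)
        :: (List.replicate ind ' ' ++ coef ++ [' ', '+', ' '] ++ List.replicate w '-')
        :: linesAbs (ind + coef.length + 3) (b :: rest)

-- widths of the successive suffixes (what Source B's widths list holds)
def sufW : List Int → List Nat
  | [] => []
  | a :: rest => W (a :: rest) :: sufW rest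

theorem toChars_pos (n : Int) : 0 < (PySem.Int.toChars n).length := by
  simp only [PySem.Int.toChars]
  split <;> simp [Nat.length_toDigits_pos]

theorem toChars_ne_newline (n : Int) : '\n' ∉ PySem.Int.toChars n := by
  simp only [PySem.Int.toChars]
  intro h
  have hd : ∀ m : Nat, '\n' ∈ Nat.toDigits 10 m → False := by
    intro m hm
    have := Nat.isDigit_of_mem_toDigits (by norm_num) (by norm_num) hm
    simp [Char.isDigit] at this
  split at h
  · rcases List.mem_cons.mp h with h | h
    · exact absurd h (by decide)
    · exact hd _ h
  · exact hd _ h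

theorem W_pos (l : List Int) (h : l ≠ []) : 0 < W l := by
  match l with
  | [a] => simpa [W] using toChars_pos a
  | a :: b :: rest => simp [W]

theorem charCenter_one_length (w : Nat) (hw : 0 < w) : (charCenter ['1'] w).length = w := by
  simp only [charCenter]
  split
  · simp_all; omega
  · have h2 : ¬((w - 1) % 2 = 1 ∧ w % 2 = 1) := by omega
    simp [h2]
    omega

theorem charCenter_one_ne_newline (w : Nat) : '\n' ∉ charCenter ['1'] w := by
  simp only [charCenter]
  split
  · decide
  · simp

theorem linesF_ne_nil (l : List Int) (h : l ≠ []) : linesF l ≠ [] := by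
  match l with
  | [a] => simp [linesF]
  | a :: b :: rest => simp [linesF]

theorem linesF_length (l : List Int) (h : l ≠ []) :
    ∀ line ∈ linesF l, line.length = W l := by
  match l with
  | [a] => intro line hl; simp [linesF] at hl; simp [hl, W]
  | a :: b :: rest =>
    intro line hl
    simp only [linesF, List.mem_cons, List.mem_map] at hl
    rcases hl with rfl | rfl | ⟨x, hx, rfl⟩
    · have := charCenter_one_length (W (b :: rest)) (W_pos _ (by simp))
      simp [W, this]
    · simp [W]; omega
    · have := linesF_length (b :: rest) (by simp) x hx
      simp [W, this]

theorem linesF_clean (l : List Int) :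
    ∀ line ∈ linesF l, '\n' ∉ line := by
  match l with
  | [] => simp [linesF]
  | [a] => intro line hl; simp [linesF] at hl; simpa [hl] using toChars_ne_newline a
  | a :: b :: rest =>
    intro line hl
    simp only [linesF, List.mem_cons, List.mem_map] at hl
    rcases hl with rfl | rfl | ⟨x, hx, rfl⟩
    · intro hmem
      rcases List.mem_append.mp hmem with hm | hm
      · exact absurd (List.eq_of_mem_replicate hm) (by decide)
      · exact charCenter_one_ne_newline _ hm
    · intro hmem
      rcases List.mem_append.mp hmem with hm | hm
      · rcases List.mem_append.mp hm with hm' | hm'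
        · exact toChars_ne_newline a hm'
        · revert hm'; decide
      · exact absurd (List.eq_of_mem_replicate hm) (by decide)
    · intro hmem
      rcases List.mem_append.mp hmem with hm | hm
      · exact absurd (List.eq_of_mem_replicate hm) (by decide)
      · exact linesF_clean (b :: rest) x hx hm

-- ---- splitOn/join roundtrip for single-char separator '\n' on clean lines ----

theorem go_nil (fuel : Nat) (cur : List Char) (acc : List (List Char)) :
    PySem.Chars.splitOn.go ['\n'] fuel [] cur acc = (cur.reverse :: acc).reverse := by
  cases fuel <;> simp [PySem.Chars.splitOn.go]

theorem go_step (fuel : Nat) (c : Char) (hc : c ≠ '\n') (rest cur : List Char)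
    (acc : List (List Char)) :
    PySem.Chars.splitOn.go ['\n'] (fuel + 1) (c :: rest) cur acc =
      PySem.Chars.splitOn.go ['\n'] fuel rest (c :: cur) acc := by
  simp [PySem.Chars.splitOn.go, List.isPrefixOf, Ne.symm hc]

theorem go_newline (fuel : Nat) (rest cur : List Char) (acc : List (List Char)) :
    PySem.Chars.splitOn.go ['\n'] (fuel + 1) ('\n' :: rest) cur acc =
      PySem.Chars.splitOn.go ['\n'] fuel rest [] (cur.reverse :: acc) := by
  simp [PySem.Chars.splitOn.go, List.isPrefixOf]

theorem go_clean (seg : List Char) :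
    ∀ fuel cur rest acc, '\n' ∉ seg → seg.length ≤ fuel →
    PySem.Chars.splitOn.go ['\n'] (fuel + 1) (seg ++ rest) cur acc =
      PySem.Chars.splitOn.go ['\n'] (fuel + 1 - seg.length) rest (seg.reverse ++ cur) acc := by
  induction seg with
  | nil => intro fuel cur rest acc _ _; simp
  | cons c seg' ih =>
    intro fuel cur rest acc hclean hfuel
    simp only [List.length_cons] at hfuel
    obtain ⟨f, rfl⟩ : ∃ f, fuel = f + 1 := ⟨fuel - 1, by omega⟩
    rw [List.cons_append, go_step (f + 1) c (by simp at hclean; tauto)]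
    rw [ih f (c :: cur) rest acc (by simp at hclean; tauto) (by omega)]
    have hfe : f + 1 + 1 - (c :: seg').length = f + 1 - seg'.length := by
      simp
    rw [hfe, List.reverse_cons, List.append_assoc, List.singleton_append]

theorem go_join (lines : List (List Char)) :
    ∀ acc fuel, lines ≠ [] → (∀ x ∈ lines, '\n' ∉ x) →
    (PySem.Chars.join ['\n'] lines).length ≤ fuel →
    PySem.Chars.splitOn.go ['\n'] (fuel + 1) (PySem.Chars.join ['\n'] lines) [] acc =
      acc.reverse ++ lines := by
  induction lines with
  | nil => intro acc fuel h; exact absurd rfl h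
  | cons x rest ih =>
    intro acc fuel _ hclean hfuel
    match rest with
    | [] =>
      rw [PySem.Chars.join_singleton] at *
      have := go_clean x fuel [] [] acc (hclean x (by simp)) hfuel
      simpa [go_nil] using this
    | y :: rest' =>
      rw [PySem.Chars.join_cons_cons] at *
      rw [List.append_assoc, List.singleton_append]
      rw [go_clean x fuel [] _ acc (hclean x (by simp)) (by simp at hfuel; omega)]
      simp only [List.append_nil]
      obtain ⟨g, hg⟩ : ∃ g, fuel + 1 - x.length = g + 1 := ⟨fuel - x.length, by simp at hfuel; omega⟩
      rw [hg, go_newline]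
      obtain ⟨g', rfl⟩ : ∃ g', g = g' + 1 := ⟨g - 1, by simp at hfuel; omega⟩
      rw [List.reverse_reverse]
      rw [ih (x :: acc) g' (by simp) (fun z hz => hclean z (by simp [hz]))
        (by simp at hfuel ⊢; omega)]
      simp

theorem splitOn_join (lines : List (List Char)) (h1 : lines ≠ [])
    (h2 : ∀ x ∈ lines, '\n' ∉ x) :
    PySem.Chars.splitOn (PySem.Chars.join ['\n'] lines) ['\n'] = lines := by
  unfold PySem.Chars.splitOn
  simpa using go_join lines [] (PySem.Chars.join ['\n'] lines).length h1 h2 le_rfl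

-- ---- A computes the canonical lines ----

theorem A_eq_linesF (l : List Int) (h : l ≠ []) :
    formatSeriesA l = PySem.Chars.join ['\n'] (linesF l) := by
  match l with
  | [a] => simp [formatSeriesA, linesF]
  | a :: b :: rest =>
    have hrec := A_eq_linesF (b :: rest) (by simp)
    have hdrop : PySem.List.slice (a :: b :: rest) (some 1) none = b :: rest := by
      rw [PySem.List.slice_from (a := 1) _ (by norm_num)]; rfl
    have hsplit : PySem.Chars.splitOn (formatSeriesA (b :: rest)) ['\n'] = linesF (b :: rest) := by
      rw [hrec, splitOn_join _ (linesF_ne_nil _ (by simp)) (linesF_clean _)]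
    have hW : 0 < W (b :: rest) := W_pos _ (by simp)
    have hhead : (linesF (b :: rest)).headI.length = W (b :: rest) := by
      obtain ⟨L0, Ls, hL⟩ := List.exists_cons_of_ne_nil (linesF_ne_nil (b :: rest) (by simp))
      rw [hL]
      exact linesF_length _ (by simp) _ (by rw [hL]; simp)
    rw [formatSeriesA]
    simp only [List.length_cons, hdrop, hsplit]
    rw [if_neg (by simp), if_pos (by omega)]
    simp only [List.headI_cons, List.cons_append, List.headI_cons, List.drop_succ_cons,
      List.drop_zero, hhead]
    rw [linesF]
    have hcl : (charCenter ['1'] (W (b :: rest))).length = W (b :: rest) :=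
      charCenter_one_length _ hW
    have h1 : charRjust (charCenter ['1'] (W (b :: rest)))
        ((PySem.Int.toChars a).length + 3 + W (b :: rest)) =
        List.replicate ((PySem.Int.toChars a).length + 3) ' ' ++
          charCenter ['1'] (W (b :: rest)) := by
      simp only [charRjust, hcl]
      congr 2
      omega
    rw [h1]
    refine congrArg _ ?_
    simp only [List.nil_append, List.cons.injEq, true_and]
    apply List.map_congr_left
    intro line hline
    have hlen := linesF_length (b :: rest) (by simp) line hline
    simp only [charRjust, hlen]
    congr 2
    omega
termination_by l.length

-- ---- B computes the canonical lines ----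

theorem linesAbs_eq (l : List Int) : ∀ ind,
    linesAbs ind l = (linesF l).map (fun line => List.replicate ind ' ' ++ line) := by
  match l with
  | [] => intro ind; simp [linesAbs, linesF]
  | [a] => intro ind; simp [linesAbs, linesF]
  | a :: b :: rest =>
    intro ind
    have ih := linesAbs_eq (b :: rest) (ind + (PySem.Int.toChars a).length + 3)
    simp only [linesAbs, linesF, ih, List.map_cons, List.map_map, List.cons.injEq]
    refine ⟨?_, by simp, ?_⟩
    · rw [show ind + (PySem.Int.toChars a).length + 3 =
          ind + ((PySem.Int.toChars a).length + 3) from by omega, List.replicate_add,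
        List.append_assoc]
    · apply List.map_congr_left
      intro x _
      simp only [Function.comp_apply]
      rw [show ind + (PySem.Int.toChars a).length + 3 =
          ind + ((PySem.Int.toChars a).length + 3) from by omega, List.replicate_add,
        List.append_assoc]

theorem widths0_eq (l : List Int) (h : l ≠ []) :
    ((l.map PySem.Int.toChars).dropLast.reverse).foldl
        (fun ws r => ws ++ [r.length + 3 + ws.getLast!])
        [(l.map PySem.Int.toChars).getLast!.length] = (sufW l).reverse := by
  match l with
  | [a] => simp [sufW, W]
  | a :: b :: rest =>
    have ih := widths0_eq (b :: rest) (by simp)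
    have hlast : ((a :: b :: rest).map PySem.Int.toChars).getLast! =
        ((b :: rest).map PySem.Int.toChars).getLast! := by
      simp [List.getLast!_eq_getLast?_getD, List.getLast?_cons_cons]
    have hdrop : ((a :: b :: rest).map PySem.Int.toChars).dropLast =
        PySem.Int.toChars a :: ((b :: rest).map PySem.Int.toChars).dropLast := by
      simp
    rw [hdrop, hlast]
    rw [List.reverse_cons, List.foldl_append, ih]
    have hW : ((sufW (b :: rest)).reverse).getLast! = W (b :: rest) := by
      rw [sufW]
      simp [List.getLast!_eq_getLast?_getD, List.getLast?_reverse]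
    simp only [List.foldl_cons, List.foldl_nil, hW]
    rw [show sufW (a :: b :: rest) = W (a :: b :: rest) :: sufW (b :: rest) from rfl]
    simp [W]

theorem loopB (l : List Int) (h : l ≠ []) : ∀ (acc : List (List Char)) (ind : Nat),
    (let st := ((l.map PySem.Int.toChars).dropLast.zip ((sufW l).drop 1)).foldl
        (fun (st : List (List Char) × Nat) rw =>
          (st.1 ++
            [List.replicate (st.2 + rw.1.length + 3) ' ' ++ charCenter ['1'] rw.2,
             List.replicate st.2 ' ' ++ rw.1 ++ [' ', '+', ' '] ++ List.replicate rw.2 '-'],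
           st.2 + rw.1.length + 3))
        (acc, ind)
     st.1 ++ [List.replicate st.2 ' ' ++ (l.map PySem.Int.toChars).getLast!]) =
      acc ++ linesAbs ind l := by
  match l with
  | [a] => intro acc ind; simp [sufW, linesAbs]
  | a :: b :: rest =>
    intro acc ind
    have hlast : ((a :: b :: rest).map PySem.Int.toChars).getLast! =
        ((b :: rest).map PySem.Int.toChars).getLast! := by
      simp [List.getLast!_eq_getLast?_getD, List.getLast?_cons_cons]
    have hdrop : ((a :: b :: rest).map PySem.Int.toChars).dropLast =
        PySem.Int.toChars a :: ((b :: rest).map PySem.Int.toChars).dropLast := by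
      simp
    have hsuf : (sufW (a :: b :: rest)).drop 1 = W (b :: rest) :: (sufW (b :: rest)).drop 1 := by
      simp [sufW]
    rw [hdrop, hsuf, hlast]
    simp only [List.zip_cons_cons, List.foldl_cons]
    have ih := loopB (b :: rest) (by simp)
      (acc ++
        [List.replicate (ind + (PySem.Int.toChars a).length + 3) ' ' ++
            charCenter ['1'] (W (b :: rest)),
         List.replicate ind ' ' ++ PySem.Int.toChars a ++ [' ', '+', ' '] ++
            List.replicate (W (b :: rest)) '-'])
      (ind + (PySem.Int.toChars a).length + 3)
    simp only at ih ⊢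
    rw [ih]
    simp [linesAbs]

theorem B_eq_linesF (l : List Int) (h : l ≠ []) :
    format_series_alt l = String.ofList (PySem.Chars.join ['\n'] (linesF l)) := by
  match l with
  | [a] => simp [format_series_alt, linesF, PySem.Chars.join_singleton]
  | a :: b :: rest =>
    rw [format_series_alt]
    simp only [List.length_map, List.length_cons]
    rw [if_neg (by simp)]
    have hw := widths0_eq (a :: b :: rest) (by simp)
    simp only at hw
    rw [hw, List.reverse_reverse]
    have hl := loopB (a :: b :: rest) (by simp) [] 0
    simp only at hl
    rw [hl]
    rw [linesAbs_eq (a :: b :: rest) 0]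
    simp

-- ===== VERDICT (by name: the statement is the Claim_ definition above) =====
theorem format_series_spec : Claim_equal_format_series := by
  intro l _ hpre
  unfold Spec_format_series format_series
  rw [A_eq_linesF l hpre, B_eq_linesF l hpre]
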